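-- pv_equiv track=rewrite | github.com/miliar/Code_Jam_Webscraper | solutions_python/Problem_155/876.py | get_ans
-- ===== SOURCE A (Python) =====
-- def get_ans(Smax, Slevels, num):
-- 	ans = 0
-- 	up_aud = 0
-- 	for i in range(len(Slevels)):
-- 		s = int(Slevels[i])
-- 		# print "prev level=%d, up_aud=%d, ans=%d, amnt=%d" % (i, up_aud, ans, s)
-- 		if i <= up_aud:
-- 			up_aud += s
-- 		elif s > 0:
-- 			ans += i - up_aud
-- 			up_aud += i - up_aud
-- 			up_aud += s
-- 		# print "post level=%d, up_aud=%d, ans=%d, amnt=%d" % (i, up_aud, ans, s)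
-- 	return "Case #%d: %d" % (num, ans)
-- ===== SOURCE B (Python) =====
-- def get_ans(Smax, Slevels, num):
--     # Staged passes: parse all counts, build the prefix-sum list of real people
--     # before each level, collect the deficits i - prefix[i] at positive levels,
--     # then take their maximum (or 0).
--     vals = [int(s) for s in Slevels]
--     prefix = []
--     p = 0
--     for v in vals:
--         prefix.append(p)
--         p += v
--     deficits = [i - q for i, (q, v) in enumerate(zip(prefix, vals)) if v > 0]
--     best = 0
--     for d in deficits:
--         best = max(best, d)
--     return "Case #%d: %d" % (num, best)
-- ===== Notes on version B (the rewrite author's own statement) =====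
-- stated objective: alternative
-- what changed: Replaces A's one-pass blended-audience simulation (up_aud mixing real people with invited friends, paying invites branch by branch) with staged passes: parse all counts, build a prefix-sum list, collect the deficits i - prefix[i] at positive levels, and return their maximum.
-- outside the precondition, e.g. on get_ans(0, ['-2', '-2', '4', '0'], 1): A returns 'Case #1: 4', B returns 'Case #1: 6'; on get_ans(0, ['x'], 1): A raises ValueError, B raises ValueError
import Mathlib
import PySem

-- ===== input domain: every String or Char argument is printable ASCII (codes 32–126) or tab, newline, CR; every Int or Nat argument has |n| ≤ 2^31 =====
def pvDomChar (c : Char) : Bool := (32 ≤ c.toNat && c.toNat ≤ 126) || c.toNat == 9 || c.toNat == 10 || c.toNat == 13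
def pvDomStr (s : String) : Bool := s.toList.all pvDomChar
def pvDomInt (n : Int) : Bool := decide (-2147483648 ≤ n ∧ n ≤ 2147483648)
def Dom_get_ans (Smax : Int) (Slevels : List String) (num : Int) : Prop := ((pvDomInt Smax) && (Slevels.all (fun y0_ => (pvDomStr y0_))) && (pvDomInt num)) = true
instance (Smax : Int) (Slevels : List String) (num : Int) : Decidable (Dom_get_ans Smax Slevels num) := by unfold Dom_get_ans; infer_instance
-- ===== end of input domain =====

-- B replaces A's one-pass blended-audience simulation by staged passes: parse, prefix sums, deficits, max (same cost, different decomposition).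

-- ===== PORT A =====
-- loop body of A: state (ans, up_aud), input (i, Slevels[i])
def stepA (p : Int × Int) (q : Int × String) : Int × Int :=
  let s := (PySem.Int.ofStr? q.2).getD 0   -- Pre_ guarantees int() does not raise
  if q.1 ≤ p.2 then (p.1, p.2 + s)
  else if 0 < s then (p.1 + (q.1 - p.2), p.2 + (q.1 - p.2) + s)
  else p

def get_ans (Smax : Int) (Slevels : List String) (num : Int) : String :=
  let st := (PySem.List.pyRange 0 (Slevels.length : Int) 1).foldl
    (fun p i => stepA p (i, PySem.List.pyGetD Slevels i "")) (0, 0)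
  "Case #" ++ PySem.Int.toStr num ++ ": " ++ PySem.Int.toStr st.1

-- ===== PORT B =====
-- transcription of B's prefix-building loop: running sum p, emit p before adding each value
def pvPrefixes (p : Int) : List Int → List Int
  | [] => []
  | v :: t => p :: pvPrefixes (p + v) t

def get_ans_alt (Smax : Int) (Slevels : List String) (num : Int) : String :=
  let vals := Slevels.map (fun s => (PySem.Int.ofStr? s).getD 0)  -- Pre_ guarantees int() does not raise
  let pref := pvPrefixes 0 vals
  let deficits := ((PySem.List.enumerate (pref.zip vals) 0).filter (fun q => 0 < q.2.2)).map
    (fun q => q.1 - q.2.1)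
  let best := deficits.foldl max 0
  "Case #" ++ PySem.Int.toStr num ++ ": " ++ PySem.Int.toStr best

-- ===== PRECONDITION & SPEC =====
-- Pre_ excludes strings on which int() raises ValueError (A raises there) and level counts that
-- parse as NEGATIVE integers: negative attendee counts are outside the task's natural domain, and
-- there A's blended-audience bookkeeping and B's prefix-sum reading legitimately diverge.
def Pre_get_ans (Smax : Int) (Slevels : List String) (num : Int) : Prop :=
  Slevels.all (fun s => ((PySem.Int.ofStr? s).map (fun k => decide (0 ≤ k))).getD false) = true
instance (Smax : Int) (Slevels : List String) (num : Int) : Decidable (Pre_get_ans Smax Slevels num) := by unfold Pre_get_ans; infer_instance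
def pvWitness_get_ans : Int × List String × Int := (3, ["0", "1", "2"], 1)

def Spec_get_ans (Smax : Int) (Slevels : List String) (num : Int) (out : String) : Prop := out = get_ans_alt Smax Slevels num
instance (Smax : Int) (Slevels : List String) (num : Int) (out : String) : Decidable (Spec_get_ans Smax Slevels num out) := by unfold Spec_get_ans; infer_instance

-- ===== CLAIM =====
def Claim_equal_get_ans : Prop := ∀ (Smax : Int) (Slevels : List String) (num : Int), Dom_get_ans Smax Slevels num → Pre_get_ans Smax Slevels num → Spec_get_ans Smax Slevels num (get_ans Smax Slevels num)

-- ===== LEMMAS AND PROOFS =====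

-- proof-side one-pass body over parsed values: state (best, people)
def stepP (p : Int × Int) (q : Int × Int) : Int × Int :=
  (if 0 < q.2 then max p.1 (q.1 - p.2) else p.1, p.2 + q.2)

-- Loop invariant: A's up_aud equals the one-pass people + the common answer so far.
lemma loop_eq (xs : List String) : ∀ (st ans up people : Int),
    (∀ s ∈ xs, ((PySem.Int.ofStr? s).map (fun k => decide (0 ≤ k))).getD false = true) →
    up = people + ans →
    (PySem.List.enumerate xs st).foldl stepA (ans, up) =
      (((PySem.List.enumerate (xs.map (fun s => (PySem.Int.ofStr? s).getD 0)) st).foldl stepP (ans, people)).1,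
       ((PySem.List.enumerate (xs.map (fun s => (PySem.Int.ofStr? s).getD 0)) st).foldl stepP (ans, people)).2 +
         ((PySem.List.enumerate (xs.map (fun s => (PySem.Int.ofStr? s).getD 0)) st).foldl stepP (ans, people)).1) := by
  induction xs with
  | nil => intro st ans up people _ hinv; simp [PySem.List.enumerate_nil, hinv, Int.add_comm]
  | cons x t ih =>
    intro st ans up people h hinv
    obtain ⟨v, hv, hv0⟩ : ∃ v : Int, PySem.Int.ofStr? x = some v ∧ 0 ≤ v := by
      have hx := h x (by simp)
      cases hxx : PySem.Int.ofStr? x with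
      | none => rw [hxx] at hx; simp at hx
      | some k => rw [hxx] at hx; simp at hx; exact ⟨k, rfl, hx⟩
    have ht : ∀ s ∈ t, ((PySem.Int.ofStr? s).map (fun k => decide (0 ≤ k))).getD false = true :=
      fun s hs => h s (by simp [hs])
    rw [List.map_cons, PySem.List.enumerate_cons, PySem.List.enumerate_cons]
    simp only [List.foldl_cons, stepA, stepP, hv, Option.getD_some]
    by_cases hle : st ≤ up
    · have hmax : (if 0 < v then max ans (st - people) else ans) = ans := by
        split <;> omega
      simp only [if_pos hle, hmax]
      exact ih (st + 1) ans (up + v) (people + v) ht (by omega)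
    · by_cases hpos : 0 < v
      · simp only [if_neg hle, if_pos hpos]
        rw [show max ans (st - people) = ans + (st - up) from by omega]
        exact ih (st + 1) (ans + (st - up)) (up + (st - up) + v) (people + v) ht (by omega)
      · have hv0' : v = 0 := by omega
        simp only [if_neg hle, hv0', add_zero]
        exact ih (st + 1) ans up people ht hinv

-- The one-pass best equals B's staged filter/map/max over prefix sums.
lemma staged_eq (vals : List Int) : ∀ (st best people : Int),
    ((PySem.List.enumerate vals st).foldl stepP (best, people)).1 =
      (((PySem.List.enumerate ((pvPrefixes people vals).zip vals) st).filter (fun q => 0 < q.2.2)).map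
        (fun q => q.1 - q.2.1)).foldl max best := by
  induction vals with
  | nil => intro st best people; simp [PySem.List.enumerate_nil, pvPrefixes]
  | cons v t ih =>
    intro st best people
    rw [pvPrefixes, List.zip_cons_cons, PySem.List.enumerate_cons, PySem.List.enumerate_cons]
    by_cases hpos : 0 < v
    · simp only [List.foldl_cons, stepP, List.filter_cons, hpos, decide_true, if_pos,
        List.map_cons, List.foldl_cons]
      exact ih (st + 1) (max best (st - people)) (people + v)
    · simp only [List.foldl_cons, stepP, List.filter_cons, decide_eq_true_eq, hpos, if_neg,
        if_false]
      exact ih (st + 1) best (people + v)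

-- ===== VERDICT =====
theorem get_ans_spec : Claim_equal_get_ans := by
  intro Smax Slevels num _ hpre
  unfold Spec_get_ans get_ans get_ans_alt
  have hfold : (PySem.List.pyRange 0 (Slevels.length : Int) 1).foldl
      (fun p i => stepA p (i, PySem.List.pyGetD Slevels i "")) ((0 : Int), (0 : Int)) =
      (PySem.List.enumerate Slevels 0).foldl stepA (0, 0) := by
    rw [PySem.List.enumerate_eq_map_pyRange (d := ""), List.foldl_map]
    simp [PySem.List.len]
  have h : ∀ s ∈ Slevels, ((PySem.Int.ofStr? s).map (fun k => decide (0 ≤ k))).getD false = true :=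
    List.all_eq_true.mp hpre
  have h1 := loop_eq Slevels 0 0 0 0 h (by omega)
  have h2 := staged_eq (Slevels.map (fun s => (PySem.Int.ofStr? s).getD 0)) 0 0 0
  simp only [hfold, h1, h2]
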